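-- pv_equiv track=rewrite | github.com/cydu24/HER | training_code/step1_roleplay_sft/split_to_single_turn.py | split_to_single_turns
-- ===== SOURCE A (Python) =====
-- def split_to_single_turns(messages):
--     """
--     将多轮对话拆分为多个单轮样本
--
--     Args:
--         messages: [system, user1, asst1, user2, asst2, ...]
--
--     Returns:
--         list of single-turn samples
--     """
--     if not messages or messages[0]['role'] != 'system':
--         return []
--
--     system_msg = messages[0]
--     samples = []
--
--     # 遍历所有 assistant 位置
--     for i, msg in enumerate(messages):
--         if msg['role'] == 'assistant':
--             # 构建单轮样本：system + 历史对话 + 当前 user/assistant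
--             single_messages = [system_msg] + messages[1:i+1]
--
--             # 确保最后一个是 assistant
--             if single_messages[-1]['role'] == 'assistant':
--                 # 检查是否有 system_thinking（如果原本没有，保持原样）
--                 # 注意：我们假设原数据只有最后一轮有 system_thinking
--                 # 拆分后，每个样本的最后一轮都应该有 system_thinking
--                 # 但如果原数据没有，我们就不加
--                 samples.append(single_messages)
--
--     return samples
-- ===== SOURCE B (Python) =====
-- def split_to_single_turns(messages):
--     if not messages or messages[0]['role'] != 'system':
--         return []
--     system_msg = messages[0]
--
--     def rec(rest):
--         # samples for the conversation tail `rest`: recursion on the structure,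
--         # later samples are built by inserting the current message after the system turn
--         if not rest:
--             return []
--         msg = rest[0]
--         later = [[s[0], msg] + s[1:] for s in rec(rest[1:])]
--         if msg['role'] == 'assistant':
--             return [[system_msg, msg]] + later
--         return later
--
--     return rec(messages[1:])
-- ===== Notes on version B (the rewrite author's own statement) =====
-- stated objective: alternative
-- what changed: B replaces A's indexed loop with per-assistant re-slicing of messages[1:i+1] by a structural recursion on the tail: samples of the shorter tail are computed first and the current message is inserted right after the system turn in each of them, emitting a fresh two-message sample at each assistant; no indices, no slices, no accumulator.
import Mathlib
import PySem

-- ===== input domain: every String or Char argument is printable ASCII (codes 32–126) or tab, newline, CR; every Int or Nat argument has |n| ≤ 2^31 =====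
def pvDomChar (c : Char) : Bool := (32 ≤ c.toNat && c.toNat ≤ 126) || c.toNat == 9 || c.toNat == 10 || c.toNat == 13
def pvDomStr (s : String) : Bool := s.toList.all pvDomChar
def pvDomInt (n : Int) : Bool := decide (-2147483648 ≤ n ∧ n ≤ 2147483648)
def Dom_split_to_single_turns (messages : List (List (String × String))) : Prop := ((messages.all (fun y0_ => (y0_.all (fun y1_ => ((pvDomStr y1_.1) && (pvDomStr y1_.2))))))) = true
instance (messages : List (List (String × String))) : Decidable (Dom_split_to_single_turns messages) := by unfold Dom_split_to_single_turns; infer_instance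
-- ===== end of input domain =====

-- B replaces A's indexed loop with re-slicing by a structural recursion on the tail that inserts
-- the current message after the system turn into every later sample (objective: alternative).

-- msg['role'] (first match in the association list); total form — Pre_ guarantees the key is present where Python reads it
def pvRole (m : List (String × String)) : String := (m.lookup "role").getD ""

-- ===== PORT A =====
-- the 'for i, msg in enumerate(messages)' loop of A
def pvLoopA (messages : List (List (String × String))) (system_msg : List (String × String)) :
    List (Int × List (String × String)) → List (List (List (String × String))) → List (List (List (String × String)))
  | [], samples => samples
  | (i, msg) :: rest, samples =>
      pvLoopA messages system_msg rest
        (if pvRole msg = "assistant" then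
           let single := system_msg :: PySem.List.slice messages (some 1) (some (i + 1))
           if pvRole (PySem.List.pyGetD single (-1) []) = "assistant" then samples ++ [single]
           else samples
         else samples)

def split_to_single_turns (messages : List (List (String × String))) : List (List (List (String × String))) :=
  match messages with
  | [] => []
  | m0 :: _ =>
    if pvRole m0 ≠ "system" then []
    else pvLoopA messages m0 (PySem.List.enumerate messages 0) []

-- ===== PORT B =====
-- Source B's inner 'rec': recursion on the tail; '[s[0], msg] + s[1:]' is ported with pyGetD/slice —
-- exact here since every sample produced by rec is nonempty (it starts with the system message)
def pvRec (system_msg : List (String × String)) :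
    List (List (String × String)) → List (List (List (String × String)))
  | [] => []
  | msg :: rest =>
      let later := (pvRec system_msg rest).map
        (fun s => PySem.List.pyGetD s 0 [] :: msg :: PySem.List.slice s (some 1) none)
      if pvRole msg = "assistant" then [system_msg, msg] :: later else later

def split_to_single_turns_alt (messages : List (List (String × String))) : List (List (List (String × String))) :=
  match messages with
  | [] => []
  | m0 :: rest =>
    if pvRole m0 ≠ "system" then []
    else pvRec m0 rest

-- ===== PRECONDITION & SPEC =====
-- Pre_ excludes exactly the inputs where Python A raises KeyError: a first message without a
-- 'role' key, or (when the first role is 'system') any later message without a 'role' key.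
def pvPreBool (messages : List (List (String × String))) : Bool :=
  match messages with
  | [] => true
  | m0 :: rest =>
      (m0.lookup "role").isSome &&
        (pvRole m0 != "system" || rest.all (fun m => (m.lookup "role").isSome))

def Pre_split_to_single_turns (messages : List (List (String × String))) : Prop :=
  pvPreBool messages = true
instance (messages : List (List (String × String))) : Decidable (Pre_split_to_single_turns messages) := by
  unfold Pre_split_to_single_turns; infer_instance

def pvWitness_split_to_single_turns : (List (List (String × String))) :=
  [[("role", "system"), ("content", "sys")],
   [("role", "user"), ("content", "q1")],
   [("role", "assistant"), ("content", "a1")],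
   [("role", "user"), ("content", "q2")],
   [("role", "assistant"), ("content", "a2")]]

def Spec_split_to_single_turns (messages : List (List (String × String))) (out : List (List (List (String × String)))) : Prop := out = split_to_single_turns_alt messages
instance (messages : List (List (String × String))) (out : List (List (List (String × String)))) : Decidable (Spec_split_to_single_turns messages out) := by unfold Spec_split_to_single_turns; infer_instance

-- ===== CLAIM (what is proved, stated in full; the proofs are below) =====
def Claim_equal_split_to_single_turns : Prop := ∀ (messages : List (List (String × String))), Dom_split_to_single_turns messages → Pre_split_to_single_turns messages → Spec_split_to_single_turns messages (split_to_single_turns messages)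

-- ===== LEMMAS AND PROOFS =====

-- common characterisation: the samples emitted for tail `tl` after the already-seen prefix `done`
def pvSpec (sys : List (String × String)) :
    List (List (String × String)) → List (List (String × String)) → List (List (List (String × String)))
  | _, [] => []
  | done, m :: tl =>
      if pvRole m = "assistant" then (sys :: (done ++ [m])) :: pvSpec sys (done ++ [m]) tl
      else pvSpec sys (done ++ [m]) tl

-- A's loop computes pvSpec
lemma pvLoopA_eq_pvSpec (m0 : List (String × String)) :
    ∀ (tl done : List (List (String × String))) (samples : List (List (List (String × String)))),
      pvLoopA (m0 :: (done ++ tl)) m0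
        (PySem.List.enumerate tl ((done.length : Int) + 1)) samples
        = samples ++ pvSpec m0 done tl := by
  intro tl
  induction tl with
  | nil =>
      intro done samples
      simp [PySem.List.enumerate, pvLoopA, pvSpec]
  | cons msg tl' ih =>
      intro done samples
      rw [PySem.List.enumerate_cons]
      have hslice : PySem.List.slice (m0 :: (done ++ msg :: tl')) (some 1)
          (some (((done.length : Int) + 1) + 1)) = done ++ [msg] := by
        have h2 : ((done.length : Int) + 1) + 1 = ((done.length + 2 : Nat) : Int) := by push_cast; ring
        rw [h2]
        have h1 : (1 : Int) = ((1 : Nat) : Int) := rfl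
        rw [h1, PySem.List.slice_natCast]
        simp [List.take_append]
      have hcons : (m0 :: (done ++ msg :: tl')) = m0 :: ((done ++ [msg]) ++ tl') := by simp
      have hlast : PySem.List.pyGetD (m0 :: (done ++ [msg])) (-1) [] = msg := by
        have : m0 :: (done ++ [msg]) = (m0 :: done) ++ [msg] := by simp
        rw [this, PySem.List.pyGetD_neg_one_append_singleton]
      have hlen : (done.length : Int) + 1 + 1 = (((done ++ [msg]).length : Int) + 1) := by simp
      simp only [pvLoopA, pvSpec, hslice, hlast]
      rw [hcons, hlen, ih (done ++ [msg])]
      by_cases hr : pvRole msg = "assistant" <;> simp [hr]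

-- inserting m after the system turn in every sample of pvSpec sys done shifts it into done
lemma map_insert_pvSpec (sys m : List (String × String)) :
    ∀ (tl done : List (List (String × String))),
      (pvSpec sys done tl).map
          (fun s => PySem.List.pyGetD s 0 [] :: m :: PySem.List.slice s (some 1) none)
        = pvSpec sys (m :: done) tl := by
  intro tl
  induction tl with
  | nil => intro done; simp [pvSpec]
  | cons x tl' ih =>
      intro done
      simp only [pvSpec]
      by_cases hr : pvRole x = "assistant"
      · rw [if_pos hr, if_pos hr, List.map_cons, ih (done ++ [x])]
        simp [PySem.List.pyGetD_zero_cons, PySem.List.slice_from_one]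
      · rw [if_neg hr, if_neg hr, ih (done ++ [x])]
        simp

-- B's recursion computes pvSpec with an empty prefix
lemma pvRec_eq_pvSpec (sys : List (String × String)) :
    ∀ (tl : List (List (String × String))), pvRec sys tl = pvSpec sys [] tl := by
  intro tl
  induction tl with
  | nil => simp [pvRec, pvSpec]
  | cons m tl' ih =>
      simp only [pvRec, pvSpec, ih, map_insert_pvSpec sys m tl' []]
      by_cases hr : pvRole m = "assistant" <;> simp [hr]

-- ===== VERDICT (by name: the statement is the Claim_ definition above) =====
theorem split_to_single_turns_spec : Claim_equal_split_to_single_turns := by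
  intro messages _ _
  unfold Spec_split_to_single_turns
  match messages with
  | [] => rfl
  | m0 :: rest =>
      simp only [split_to_single_turns, split_to_single_turns_alt]
      by_cases hs : pvRole m0 = "system"
      · simp only [hs, ne_eq, not_true_eq_false, if_false]
        rw [PySem.List.enumerate_cons]
        simp only [pvLoopA]
        have hne : ¬ pvRole m0 = "assistant" := by rw [hs]; decide
        simp only [hne]
        have := pvLoopA_eq_pvSpec m0 rest [] []
        rw [pvRec_eq_pvSpec]
        simpa using this
      · simp [hs]
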